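-- pv_equiv track=rewrite | github.com/Tetuwo181/GA | module/test_problem/test_problem.py | binary_two
-- ===== SOURCE A (Python) =====
-- def binary_two(gene):
--     """
--     多目的最適化のテスト用
--     遺伝子中の1の数と0の数をカウントし、そのタプルを返す
--     """
--     num_zero = 0
--     num_one = 0
--     for gen in gene:
--         if gen == 0:
--             num_zero = num_zero + 1
--         else:
--             num_one = num_one + 1
--     return (num_zero, num_one)
-- ===== SOURCE B (Python) =====
-- def binary_two(gene):
--     """
--     多目的最適化のテスト用
--     遺伝子中の1の数と0の数をカウントし、そのタプルを返す
--     """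
--     return _count(list(gene))
--
--
-- def _count(seq):
--     """Divide and conquer: split the sequence in half, count each half
--     recursively, and add the two (zeros, nonzeros) pairs."""
--     n = len(seq)
--     if n == 0:
--         return (0, 0)
--     if n == 1:
--         return (1, 0) if seq[0] == 0 else (0, 1)
--     mid = n // 2
--     z1, o1 = _count(seq[:mid])
--     z2, o2 = _count(seq[mid:])
--     return (z1 + z2, o1 + o2)
-- ===== Notes on version B (the rewrite author's own statement) =====
-- stated objective: alternative
-- what changed: B replaces A's single linear pass with two if/else counters by a divide-and-conquer recursion: split the list in half, recursively count (zeros, nonzeros) in each half, and add the pairs.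
import Mathlib
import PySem

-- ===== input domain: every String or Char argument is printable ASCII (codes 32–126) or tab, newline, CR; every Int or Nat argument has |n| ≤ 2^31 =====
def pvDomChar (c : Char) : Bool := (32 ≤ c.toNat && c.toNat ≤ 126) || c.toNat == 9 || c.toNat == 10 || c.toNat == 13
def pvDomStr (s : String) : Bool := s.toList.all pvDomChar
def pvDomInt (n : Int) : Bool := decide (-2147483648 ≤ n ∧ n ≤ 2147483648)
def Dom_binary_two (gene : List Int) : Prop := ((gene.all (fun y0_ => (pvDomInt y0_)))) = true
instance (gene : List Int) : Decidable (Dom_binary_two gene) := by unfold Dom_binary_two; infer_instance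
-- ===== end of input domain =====

-- B counts (zeros, nonzeros) by divide-and-conquer over list halves instead of A's linear two-counter loop; return values proved equal.

-- ===== PORT A =====
-- literal port: loop updating two counters in if/else branches
def binary_two (gene : List Int) : Int × Int :=
  gene.foldl (fun (st : Int × Int) gen =>
    if gen == 0 then (st.1 + 1, st.2) else (st.1, st.2 + 1)) (0, 0)

-- ===== PORT B =====
-- _count from Source B: split in half, recurse, add pairs (seq[:mid]/seq[mid:] with
-- 0 ≤ mid ≤ n are exactly take/drop; seq[0] on a singleton is headI).
-- The fuel argument (initially the length, halved lists are strictly shorter)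
-- only makes the same recursion structurally total; fuel 0 is never reached.
def pvCount : Nat → List Int → Int × Int
  | 0, _ => (0, 0)
  | fuel + 1, seq =>
    if seq.length = 0 then (0, 0)
    else if seq.length = 1 then (if seq.headI == 0 then (1, 0) else (0, 1))
    else
      let mid := seq.length / 2
      let p1 := pvCount fuel (seq.take mid)
      let p2 := pvCount fuel (seq.drop mid)
      (p1.1 + p2.1, p1.2 + p2.2)

def binary_two_alt (gene : List Int) : Int × Int := pvCount gene.length gene

-- ===== PRECONDITION & SPEC =====
def Spec_binary_two (gene : List Int) (out : Int × Int) : Prop := out = binary_two_alt gene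
instance (gene : List Int) (out : Int × Int) : Decidable (Spec_binary_two gene out) := by unfold Spec_binary_two; infer_instance

-- ===== CLAIM (what is proved, stated in full; the proofs are below) =====
def Claim_equal_binary_two : Prop := ∀ (gene : List Int), Dom_binary_two gene → Spec_binary_two gene (binary_two gene)

-- ===== LEMMAS AND PROOFS =====

-- ===== VERDICT (by name: the statement is the Claim_ definition above) =====
theorem foldA_inv (l : List Int) (z o : Int) :
    l.foldl (fun (st : Int × Int) gen =>
      if gen == 0 then (st.1 + 1, st.2) else (st.1, st.2 + 1)) (z, o)
      = (z + (l.countP (fun g => g == 0) : Int),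
         o + (l.countP (fun g => !(g == 0)) : Int)) := by
  induction l generalizing z o with
  | nil => simp
  | cons x xs ih =>
    rw [List.foldl_cons]
    by_cases hx : x = 0
    · rw [if_pos (by simp [hx]), ih]
      simp [hx]
      ring
    · rw [if_neg (by simp [hx]), ih]
      simp [hx]
      ring

theorem pvCount_eq (fuel : Nat) (seq : List Int) (hf : seq.length ≤ fuel) :
    pvCount fuel seq = ((seq.countP (fun g => g == 0) : Int),
                       (seq.countP (fun g => !(g == 0)) : Int)) := by
  induction fuel generalizing seq with
  | zero =>
    rw [List.length_eq_zero_iff.mp (Nat.le_zero.mp hf)]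
    simp [pvCount]
  | succ fuel ih => ?_
  rw [pvCount]
  by_cases h0 : seq.length = 0
  · rw [if_pos h0]
    simp [List.length_eq_zero_iff.mp h0]
  · rw [if_neg h0]
    by_cases h1 : seq.length = 1
    · rw [if_pos h1]
      obtain ⟨x, hx⟩ := List.length_eq_one_iff.mp h1
      subst hx
      by_cases hz : x = 0
      · rw [if_pos (by simp [hz])]; simp [hz]
      · rw [if_neg (by simp [hz])]; simp [hz]
    · rw [if_neg h1]
      have h := List.take_append_drop (seq.length / 2) seq
      simp only [ih (seq.take (seq.length / 2)) (by simp; omega),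
        ih (seq.drop (seq.length / 2)) (by simp; omega), Prod.mk.injEq]
      refine ⟨?_, ?_⟩ <;>
        rw [← Int.natCast_add, ← List.countP_append, h]

-- ===== VERDICT (by name: the statement is the Claim_ definition above) =====
theorem binary_two_spec : Claim_equal_binary_two := by
  intro gene _
  unfold Spec_binary_two binary_two binary_two_alt
  rw [foldA_inv, pvCount_eq gene.length gene le_rfl]
  simp
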